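-- pv_equiv track=rewrite | github.com/codeNino/akwaya | internal/domain/pipeline/loader.py | parse_location
-- ===== SOURCE A (Python) =====
-- from typing import Dict, List
--
-- def parse_location(location_str: str) -> Dict:
--     """
--     Parse location string into structured JSONB format
--
--     Args:
--         location_str: Location string like "New York, NY" or "London, UK"
--
--     Returns:
--         Dict with city, country, and full_address
--     """
--     if not location_str:
--         return {}
--
--     parts = [p.strip() for p in location_str.split(',')]
--
--     result = {
--         'full_address': location_str
--     }
--
--     if len(parts) >= 1:
--         result['city'] = parts[0]
--     if len(parts) >= 2:
--         result['country'] = parts[-1]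
--
--     return result
-- ===== SOURCE B (Python) =====
-- def parse_location(location_str: str):
--     """Same result as A, but without building the list of all comma-separated
--     parts: only the first and last comma positions and their two slices."""
--     if not location_str:
--         return {}
--     result = {'full_address': location_str}
--     i = location_str.find(',')
--     if i == -1:
--         result['city'] = location_str.strip()
--     else:
--         result['city'] = location_str[:i].strip()
--         result['country'] = location_str[location_str.rfind(',') + 1:].strip()
--     return result
-- ===== Notes on version B (the rewrite author's own statement) =====
-- stated objective: simpler
-- what changed: B never builds the list of comma-separated parts: it locates the first comma with find and the last with rfind and strips just those two boundary slices (or the whole string when there is no comma).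
import Mathlib
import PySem

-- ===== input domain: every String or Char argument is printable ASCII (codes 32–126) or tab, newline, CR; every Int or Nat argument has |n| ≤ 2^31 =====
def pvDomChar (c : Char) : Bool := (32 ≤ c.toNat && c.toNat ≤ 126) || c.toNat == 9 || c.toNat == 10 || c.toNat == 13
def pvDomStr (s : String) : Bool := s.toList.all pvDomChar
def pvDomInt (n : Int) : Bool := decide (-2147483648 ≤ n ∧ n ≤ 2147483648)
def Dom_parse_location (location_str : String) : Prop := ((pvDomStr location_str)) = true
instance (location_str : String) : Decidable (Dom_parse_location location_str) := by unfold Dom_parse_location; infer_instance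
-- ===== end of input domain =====

-- B avoids building the list of all comma-separated parts: it strips only the two
-- boundary slices given by the first (find) and last (rfind) comma. Objective: simpler.

-- ===== PORT A =====
def parse_location (location_str : String) : List (String × String) :=
  if location_str = "" then []
  else
    -- sep "," is a nonempty literal, so split? is `some`; the getD defaults are unreachable
    let parts := ((PySem.Str.split? location_str ",").getD []).map PySem.Str.strip
    let result : PySem.Dict String String := ⟨[("full_address", location_str)]⟩
    let result := if 1 ≤ parts.length then result.insert "city" ((PySem.List.pyGet? parts 0).getD "") else result
    let result := if 2 ≤ parts.length then result.insert "country" ((PySem.List.pyGet? parts (-1)).getD "") else result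
    result.items

-- ===== PORT B =====
def parse_location_alt (location_str : String) : List (String × String) :=
  if location_str = "" then []
  else
    let i := PySem.Str.find location_str ","
    if i = -1 then
      [("full_address", location_str), ("city", PySem.Str.strip location_str)]
    else
      let j := PySem.Str.rfind location_str ","
      [("full_address", location_str),
       ("city", PySem.Str.strip (PySem.Str.slice location_str none (some i))),
       ("country", PySem.Str.strip (PySem.Str.slice location_str (some (j + 1)) none))]

-- ===== PRECONDITION & SPEC =====
def Spec_parse_location (location_str : String) (out : List (String × String)) : Prop := out = parse_location_alt location_str
instance (location_str : String) (out : List (String × String)) : Decidable (Spec_parse_location location_str out) := by unfold Spec_parse_location; infer_instance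

-- ===== CLAIM (what is proved, stated in full; the proofs are below) =====
def Claim_equal_parse_location : Prop := ∀ (location_str : String), Dom_parse_location location_str → Spec_parse_location location_str (parse_location location_str)

-- ===== LEMMAS AND PROOFS =====

/-- cons onto the head part (proof-only helper). -/
def pvConsHd (p : List Char) : List (List Char) → List (List Char)
  | [] => [p]
  | h :: t => (p ++ h) :: t

/-- simple structural model of splitting on ','. -/
def pvSplit : List Char → List (List Char)
  | [] => [[]]
  | c :: rest => if c = ',' then [] :: pvSplit rest else pvConsHd [c] (pvSplit rest)

theorem pvSplit_ne_nil (l : List Char) : pvSplit l ≠ [] := by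
  induction l with
  | nil => simp [pvSplit]
  | cons c rest ih =>
    simp only [pvSplit]
    split
    · simp
    · cases h : pvSplit rest with
      | nil => exact absurd h ih
      | cons a t => simp [pvConsHd]

theorem pvConsHd_nil (ps : List (List Char)) (h : ps ≠ []) : pvConsHd [] ps = ps := by
  cases ps with
  | nil => exact absurd rfl h
  | cons a t => simp [pvConsHd]

theorem pvConsHd_pvConsHd (p q : List Char) (ps : List (List Char)) :
    pvConsHd p (pvConsHd q ps) = pvConsHd (p ++ q) ps := by
  cases ps with
  | nil => simp [pvConsHd]
  | cons a t => simp [pvConsHd]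

theorem pv_isPrefixOf_comma (x : List Char) :
    [','].isPrefixOf x = (x.head? == some ',') := by
  cases x with
  | nil => simp [List.isPrefixOf]
  | cons a t => simp [List.isPrefixOf, BEq.comm]

theorem pv_splitOn_go (fuel : Nat) (l cur : List Char) (acc : List (List Char))
    (h : l.length < fuel) :
    PySem.Chars.splitOn.go [','] fuel l cur acc = acc.reverse ++ pvConsHd cur.reverse (pvSplit l) := by
  induction fuel generalizing l cur acc with
  | zero => omega
  | succ f ih =>
    cases l with
    | nil => simp [PySem.Chars.splitOn.go, pvConsHd, pvSplit]
    | cons c rest =>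
      rw [PySem.Chars.splitOn.go]
      rw [pv_isPrefixOf_comma]
      simp only [List.head?]
      by_cases hc : c = ','
      · subst hc
        simp only [beq_self_eq_true, if_pos, List.length_cons, List.drop_succ_cons, List.length_nil, List.drop_zero]
        rw [ih _ _ _ (by simp at h; omega)]
        rw [List.reverse_nil, pvConsHd_nil _ (pvSplit_ne_nil rest)]
        simp [pvSplit, pvConsHd]
      · rw [if_neg (by simp [hc])]
        rw [ih _ _ _ (by simp at h; omega)]
        simp only [List.reverse_cons]
        rw [show pvSplit (c :: rest) = pvConsHd [c] (pvSplit rest) by simp [pvSplit, hc]]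
        rw [pvConsHd_pvConsHd]

theorem pv_splitOn (l : List Char) : PySem.Chars.splitOn l [','] = pvSplit l := by
  unfold PySem.Chars.splitOn
  rw [pv_splitOn_go _ _ _ _ (by omega)]
  simp [pvConsHd_nil _ (pvSplit_ne_nil l)]

theorem pvSplit_head (l : List Char) : (pvSplit l).head? = some (l.takeWhile (· != ',')) := by
  induction l with
  | nil => simp [pvSplit]
  | cons c rest ih =>
    by_cases hc : c = ','
    · subst hc; simp [pvSplit, List.takeWhile]
    · simp only [pvSplit, if_neg hc]
      cases h : pvSplit rest with
      | nil => exact absurd h (pvSplit_ne_nil rest)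
      | cons a t =>
        rw [h] at ih
        simp only [List.head?] at ih
        have hne : (c != ',') = true := by simp [hc]
        simp [pvConsHd, List.takeWhile, hne, ← Option.some_inj.mp ih]

theorem pvConsHd_length (p : List Char) (ps : List (List Char)) (h : ps ≠ []) :
    (pvConsHd p ps).length = ps.length := by
  cases ps with
  | nil => exact absurd rfl h
  | cons a t => simp [pvConsHd]

theorem pvSplit_len2 (l : List Char) : 2 ≤ (pvSplit l).length ↔ ',' ∈ l := by
  induction l with
  | nil => simp [pvSplit]
  | cons c rest ih =>
    by_cases hc : c = ','
    · subst hc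
      have hne : pvSplit rest ≠ [] := pvSplit_ne_nil rest
      simp only [pvSplit, List.mem_cons]
      cases h : pvSplit rest with
      | nil => exact absurd h hne
      | cons a t => simp
    · simp only [pvSplit, if_neg hc, pvConsHd_length _ _ (pvSplit_ne_nil rest), List.mem_cons]
      rw [ih]
      constructor
      · exact Or.inr
      · rintro (h | h)
        · exact absurd h.symm hc
        · exact h
      

theorem pvSplit_not_mem (l : List Char) (h : ',' ∉ l) : pvSplit l = [l] := by
  induction l with
  | nil => simp [pvSplit]
  | cons c rest ih =>
    simp only [List.mem_cons, not_or] at h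
    have hc : ¬ c = ',' := fun hc => h.1 hc.symm
    simp [pvSplit, hc, ih h.2, pvConsHd]

theorem pv_takeWhile_all (x : List Char) (h : ',' ∉ x) : x.takeWhile (· != ',') = x := by
  induction x with
  | nil => simp
  | cons c rest ih =>
    simp only [List.mem_cons, not_or] at h
    have hc : (c != ',') = true := by simp; exact fun e => h.1 e.symm
    simp [List.takeWhile, hc, ih h.2]

theorem pv_takeWhile_len_ne (x : List Char) (h : ',' ∈ x) :
    (x.takeWhile (· != ',')).length ≠ x.length := by
  intro hlen
  have heq := List.IsPrefix.eq_of_length (List.takeWhile_prefix _) hlen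
  have := List.mem_takeWhile_imp (heq ▸ h)
  simp at this

theorem pv_takeWhile_append_mem (x y : List Char) (h : ',' ∈ x) :
    (x ++ y).takeWhile (· != ',') = x.takeWhile (· != ',') := by
  rw [List.takeWhile_append, if_neg (pv_takeWhile_len_ne x h)]

theorem pv_takeWhile_snoc_comma (x : List Char) :
    (x ++ [',']).takeWhile (· != ',') = x.takeWhile (· != ',') := by
  rw [List.takeWhile_append]
  split
  · next hlen => rw [List.IsPrefix.eq_of_length (List.takeWhile_prefix _) hlen]; simp [List.takeWhile]
  · rfl

theorem pvSplit_getLast (l : List Char) :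
    (pvSplit l).getLast? = some ((l.reverse.takeWhile (· != ',')).reverse) := by
  induction l with
  | nil => simp [pvSplit]
  | cons c rest ih =>
    by_cases hc : c = ','
    · subst hc
      have hs : pvSplit (',' :: rest) = [] :: pvSplit rest := by simp [pvSplit]
      rw [hs, List.reverse_cons, pv_takeWhile_snoc_comma]
      cases h : pvSplit rest with
      | nil => exact absurd h (pvSplit_ne_nil rest)
      | cons a t =>
        rw [List.getLast?_cons_cons, ← h, ih]
    · by_cases hm : ',' ∈ rest
      · have h2 : 2 ≤ (pvSplit rest).length := (pvSplit_len2 rest).mpr hm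
        cases h : pvSplit rest with
        | nil => exact absurd h (pvSplit_ne_nil rest)
        | cons a t =>
          cases t with
          | nil => rw [h] at h2; simp at h2
          | cons b t' =>
            simp only [pvSplit, if_neg hc, h, pvConsHd]
            rw [List.getLast?_cons_cons, ← List.getLast?_cons_cons (a := a), ← h, ih,
              List.reverse_cons, pv_takeWhile_append_mem _ _ (by simpa using hm)]
      · have hnm : ',' ∉ (c :: rest).reverse := by
          simp only [List.mem_reverse, List.mem_cons, not_or]
          exact ⟨fun e => hc e.symm, hm⟩
        rw [pvSplit_not_mem (c :: rest) (by simpa [and_comm] using hnm), pv_takeWhile_all _ hnm]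
        simp

theorem pv_find_go (l : List Char) (k : Nat) :
    PySem.Chars.find.go [','] l k =
      if ',' ∈ l then ((k : Int) + (l.takeWhile (· != ',')).length) else -1 := by
  induction l generalizing k with
  | nil => rw [PySem.Chars.find.go]; simp
  | cons c rest ih =>
    rw [PySem.Chars.find.go, pv_isPrefixOf_comma]
    by_cases hc : c = ','
    · subst hc; simp [List.takeWhile]
    · have hcb : ((c :: rest).head? == some ',') = false := by simp [hc]
      rw [hcb, if_neg (by simp), ih]
      have hcb2 : (c != ',') = true := by simp [hc]
      simp only [List.mem_cons, List.takeWhile, hcb2]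
      by_cases hm : ',' ∈ rest
      · rw [if_pos hm, if_pos (Or.inr hm)]
        simp only [List.length_cons]
        push_cast; ring
      · rw [if_neg hm, if_neg (by rintro (e | e) <;> [exact hc e.symm; exact hm e])]

theorem pv_find (l : List Char) :
    PySem.Chars.find l [','] = if ',' ∈ l then ((l.takeWhile (· != ',')).length : Int) else -1 := by
  unfold PySem.Chars.find
  rw [pv_find_go]
  split <;> simp

theorem pv_dropWhile_head (x : List Char) (d : Char) (z : List Char)
    (h : x.dropWhile (· != ',') = d :: z) : d = ',' := by
  induction x with
  | nil => simp at h
  | cons c rest ih =>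
    by_cases hc : c = ','
    · subst hc; simp [List.dropWhile] at h; exact h.1.symm
    · have hcb : (c != ',') = true := by simp [hc]
      simp only [List.dropWhile_cons, hcb, if_true] at h
      exact ih h

theorem pv_rfind_go (l : List Char) (m : Nat)
    (hP1 : [','].isPrefixOf (l.drop m) = true)
    (hP2 : ∀ j, m < j → [','].isPrefixOf (l.drop j) = false) :
    ∀ j, m ≤ j → PySem.Chars.rfind.go l [','] j = (m : Int) := by
  intro j
  induction j with
  | zero =>
    intro hj
    have hm : m = 0 := Nat.le_zero.mp hj
    subst hm
    rw [PySem.Chars.rfind.go]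
    simp only [List.drop_zero] at hP1
    rw [hP1]
    simp
  | succ j' ih =>
    intro hj
    rw [PySem.Chars.rfind.go]
    by_cases he : m = j' + 1
    · subst he
      rw [hP1]
      simp
    · have hlt : m ≤ j' := by omega
      rw [hP2 (j' + 1) (by omega)]
      simp only [Bool.false_eq_true, if_false]
      exact ih hlt

theorem pv_rfind (l : List Char) (h : ',' ∈ l) :
    PySem.Chars.rfind l [','] = ((l.length - 1 - (l.reverse.takeWhile (· != ',')).length : Int)) := by
  have hmemr : ',' ∈ l.reverse := by simpa using h
  have hdw : l.reverse.dropWhile (· != ',') ≠ [] := by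
    intro hnil
    rw [List.dropWhile_eq_nil_iff] at hnil
    have := hnil ',' hmemr
    simp at this
  obtain ⟨d, z, hdz⟩ : ∃ d z, l.reverse.dropWhile (· != ',') = d :: z := by
    cases hx : l.reverse.dropWhile (· != ',') with
    | nil => exact absurd hx hdw
    | cons a b => exact ⟨a, b, rfl⟩
  have hd : d = ',' := pv_dropWhile_head _ _ _ hdz
  subst hd
  set tw := l.reverse.takeWhile (· != ',') with htw
  have hsplit : l = z.reverse ++ (',' :: tw.reverse) := by
    have : tw ++ (',' :: z) = l.reverse := by rw [← hdz, htw]; exact List.takeWhile_append_dropWhile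
    calc l = l.reverse.reverse := by simp
    _ = (tw ++ (',' :: z)).reverse := by rw [this]
    _ = z.reverse ++ (',' :: tw.reverse) := by simp
  have hlen : l.length = z.length + 1 + tw.length := by
    rw [hsplit]; simp; omega
  have htwmem : ∀ c ∈ tw, (c != ',') = true := fun c hc => List.mem_takeWhile_imp (p := (· != ',')) hc
  have hP1 : [','].isPrefixOf (l.drop z.length) = true := by
    conv_lhs => rw [hsplit]
    rw [show z.length = z.reverse.length by simp, List.drop_left]
    simp [List.isPrefixOf]
  have hP2 : ∀ j, z.length < j → [','].isPrefixOf (l.drop j) = false := by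
    intro j hj
    rw [pv_isPrefixOf_comma]
    conv_lhs => rw [hsplit]
    rw [List.drop_append]
    rw [List.drop_eq_nil_of_le (by simp; omega), List.nil_append]
    have hlz : z.reverse.length = z.length := by simp
    rw [hlz]
    obtain ⟨k, hk⟩ : ∃ k, j - z.length = k + 1 := ⟨j - z.length - 1, by omega⟩
    rw [hk, List.drop_succ_cons]
    cases hh : (tw.reverse.drop k).head? with
    | none => simp
    | some c =>
      have hcmem : c ∈ tw := by
        have : c ∈ tw.reverse.drop k := List.mem_of_mem_head? (by rw [hh]; simp)
        have := List.mem_of_mem_drop this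
        simpa using this
      have := htwmem c hcmem
      simp at this
      simp [this]
  have := pv_rfind_go l z.length hP1 hP2 l.length (by omega)
  unfold PySem.Chars.rfind
  rw [this]
  omega

theorem pv_pyGet_zero {α : Type} (xs : List α) (h : xs ≠ []) :
    PySem.List.pyGet? xs 0 = xs.head? := by
  cases xs with
  | nil => exact absurd rfl h
  | cons a t => simp [PySem.List.pyGet?, PySem.List.pyIdx?]

theorem pv_pyGet_neg_one {α : Type} (xs : List α) (h : xs ≠ []) :
    PySem.List.pyGet? xs (-1) = xs.getLast? := by
  have hl : 1 ≤ xs.length := List.length_pos_iff.mpr h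
  simp [PySem.List.pyGet?, PySem.List.pyIdx?, hl, List.getLast?_eq_getElem?]

theorem pv_dict1 (s v : String) :
    (PySem.Dict.mk [("full_address", s)]).insert "city" v
      = ⟨[("full_address", s), ("city", v)]⟩ := by
  simp [PySem.Dict.insert, PySem.Dict.contains]

theorem pv_dict2 (s v w : String) :
    (PySem.Dict.mk [("full_address", s), ("city", v)]).insert "country" w
      = ⟨[("full_address", s), ("city", v), ("country", w)]⟩ := by
  simp [PySem.Dict.insert, PySem.Dict.contains]

theorem pv_take_takeWhile (l : List Char) :
    l.take (l.takeWhile (· != ',')).length = l.takeWhile (· != ',') :=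
  (List.prefix_iff_eq_take.mp (List.takeWhile_prefix _)).symm

theorem pv_drop_suffix (l : List Char) :
    l.drop (l.length - (l.reverse.takeWhile (· != ',')).length)
      = (l.reverse.takeWhile (· != ',')).reverse := by
  have hdec : (l.reverse.dropWhile (· != ',')).reverse ++ (l.reverse.takeWhile (· != ',')).reverse = l := by
    rw [← List.reverse_append, List.takeWhile_append_dropWhile, List.reverse_reverse]
  have hlen : (l.reverse.dropWhile (· != ',')).reverse.length
      = l.length - (l.reverse.takeWhile (· != ',')).length := by
    have := congrArg List.length hdec
    simp at this ⊢
    omega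
  calc l.drop (l.length - (l.reverse.takeWhile (· != ',')).length)
      = l.drop (l.reverse.dropWhile (· != ',')).reverse.length := by rw [hlen]
    _ = ((l.reverse.dropWhile (· != ',')).reverse ++ (l.reverse.takeWhile (· != ',')).reverse).drop
          (l.reverse.dropWhile (· != ',')).reverse.length := by rw [hdec]
    _ = _ := List.drop_left

theorem pv_main (s : String) : parse_location s = parse_location_alt s := by
  by_cases hs : s = ""
  · simp [parse_location, parse_location_alt, hs]
  · unfold parse_location parse_location_alt
    rw [if_neg hs, if_neg hs]
    have hsplit : PySem.Str.split? s "," = some ((pvSplit s.toList).map String.ofList) := by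
      unfold PySem.Str.split? PySem.Chars.split?
      rw [show (",").toList = [','] from rfl]
      simp [pv_splitOn]
    rw [hsplit]
    simp only [Option.getD_some, List.map_map]
    have hne : (pvSplit s.toList).map (PySem.Str.strip ∘ String.ofList) ≠ [] := by
      simp [pvSplit_ne_nil]
    have hfind : PySem.Str.find s "," = PySem.Chars.find s.toList [','] := by
      rw [PySem.Str.find_eq, show (",").toList = [','] from rfl]
    by_cases hm : ',' ∈ s.toList
    · -- there is a comma: both sides carry city and country
      have hfind2 : PySem.Str.find s "," = ((s.toList.takeWhile (· != ',')).length : Int) := by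
        rw [hfind, pv_find, if_pos hm]
      rw [if_pos (show 1 ≤ ((pvSplit s.toList).map (PySem.Str.strip ∘ String.ofList)).length by
        simp only [List.length_map]
        exact Nat.one_le_iff_ne_zero.mpr (by simpa using pvSplit_ne_nil s.toList))]
      rw [if_pos (show 2 ≤ ((pvSplit s.toList).map (PySem.Str.strip ∘ String.ofList)).length by
        simp only [List.length_map]; exact (pvSplit_len2 s.toList).mpr hm)]
      rw [if_neg (show ¬ (PySem.Str.find s "," = -1) by rw [hfind2]; omega)]
      have hget0 : PySem.List.pyGet? ((pvSplit s.toList).map (PySem.Str.strip ∘ String.ofList)) 0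
          = some (PySem.Str.strip (String.ofList (s.toList.takeWhile (· != ',')))) := by
        rw [pv_pyGet_zero _ hne, List.head?_map, pvSplit_head]
        rfl
      have hgetL : PySem.List.pyGet? ((pvSplit s.toList).map (PySem.Str.strip ∘ String.ofList)) (-1)
          = some (PySem.Str.strip (String.ofList ((s.toList.reverse.takeWhile (· != ',')).reverse))) := by
        rw [pv_pyGet_neg_one _ hne, List.getLast?_map, pvSplit_getLast]
        rfl
      rw [pv_dict1, pv_dict2, hget0, hgetL]
      simp only [Option.getD_some]
      have hrfind : PySem.Str.rfind s ","
          = ((s.toList.length - 1 - (s.toList.reverse.takeWhile (· != ',')).length : Int)) := by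
        rw [PySem.Str.rfind_eq, show (",").toList = [','] from rfl, pv_rfind _ hm]
      have hcity : PySem.Str.strip (String.ofList (s.toList.takeWhile (· != ',')))
          = PySem.Str.strip (PySem.Str.slice s none (some (PySem.Str.find s ","))) := by
        rw [← String.toList_inj]
        rw [PySem.Str.toList_strip, PySem.Str.toList_strip, PySem.Str.toList_slice]
        rw [String.toList_ofList, hfind2, PySem.Chars.slice_eq_listSlice, PySem.List.slice_to_natCast, pv_take_takeWhile]
      have htwlen : (s.toList.reverse.takeWhile (· != ',')).length < s.toList.length := by
        have h1 : (s.toList.reverse.takeWhile (· != ',')).length ≤ s.toList.length := by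
          have := (List.takeWhile_sublist (l := s.toList.reverse) (· != ',')).length_le
          simpa only [List.length_reverse] using this
        rcases Nat.lt_or_ge (s.toList.reverse.takeWhile (· != ',')).length s.toList.length with h2 | h2
        · exact h2
        · exfalso
          have heq : (s.toList.reverse.takeWhile (· != ',')).length = s.toList.reverse.length := by
            simp only [List.length_reverse]; omega
          exact pv_takeWhile_len_ne s.toList.reverse (by simpa using hm) heq
      have hcountry : PySem.Str.strip (String.ofList ((s.toList.reverse.takeWhile (· != ',')).reverse))
          = PySem.Str.strip (PySem.Str.slice s (some (PySem.Str.rfind s "," + 1)) none) := by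
        rw [← String.toList_inj]
        rw [PySem.Str.toList_strip, PySem.Str.toList_strip, PySem.Str.toList_slice]
        rw [String.toList_ofList, hrfind]
        rw [show ((s.toList.length - 1 - (s.toList.reverse.takeWhile (· != ',')).length : Int) + 1)
            = ((s.toList.length - (s.toList.reverse.takeWhile (· != ',')).length : Nat) : Int) by omega]
        rw [PySem.Chars.slice_eq_listSlice, PySem.List.slice_from_natCast, pv_drop_suffix]
      rw [hcity, hcountry]
    · -- no comma: city is the whole string, no country
      have hfind2 : PySem.Str.find s "," = -1 := by
        rw [hfind, pv_find, if_neg hm]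
      rw [if_pos hfind2]
      rw [pvSplit_not_mem _ hm]
      simp only [List.map_cons, List.map_nil]
      rw [if_pos (show 1 ≤ ([(PySem.Str.strip ∘ String.ofList) s.toList] : List String).length by simp),
        if_neg (show ¬ (2 ≤ ([(PySem.Str.strip ∘ String.ofList) s.toList] : List String).length) by simp)]
      rw [pv_dict1]
      rw [pv_pyGet_zero _ (by simp)]
      simp [String.ofList_toList]

-- ===== VERDICT (by name: the statement is the Claim_ definition above) =====
theorem parse_location_spec : Claim_equal_parse_location := by
  intro s _
  unfold Spec_parse_location
  exact pv_main s
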